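-- pv_equiv track=rewrite | github.com/wojmichaluk/WDI-2022-2023 | extra/kolos_19-sam.py | three
-- ===== SOURCE A (Python) =====
-- def czynnikowo_podobne(m,n):
--     p=m
--     d=2
--     wspolne=0
--     while p>1:
--         if p%d==0:
--             if n%d==0:
--                 wspolne+=1
--             while p%d==0:
--                 p//=d
--         d+=1
--         if wspolne>1:
--             break
--     return wspolne==1
--
-- def contains(w,k,n):
--     return 0<=w<n and 0<=k<n
--
-- def three(T):
--     n=len(T)
--     num=0
--     for w in range(n):
--         for k in range(n):
--             cp=0
--             for x,y in [(-1,-1),(-1,0),(-1,1),(0,-1),(0,1),(1,-1),(1,0),(1,1)]: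
--                 if contains(w+x,k+y,n) and czynnikowo_podobne(T[w][k],T[w+x][k+y]):
--                     cp+=1
--             if cp==3:
--                 num+=1
--     return num
-- ===== SOURCE B (Python) =====
-- def prime_factors(m):
--     p = m
--     d = 2
--     fs = []
--     while p > 1:
--         if p % d == 0:
--             fs.append(d)
--             while p % d == 0:
--                 p //= d
--         d += 1
--     return fs
--
-- def three(T):
--     n = len(T)
--     F = [[prime_factors(T[w][k]) for k in range(n)] for w in range(n)]
--     num = 0
--     for w in range(n):
--         for k in range(n):
--             cp = 0
--             for x, y in ((-1, -1), (-1, 0), (-1, 1), (0, -1), (0, 1), (1, -1), (1, 0), (1, 1)):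
--                 if 0 <= w + x < n and 0 <= k + y < n and \
--                         sum(1 for q in F[w][k] if T[w + x][k + y] % q == 0) == 1:
--                     cp += 1
--             if cp == 3:
--                 num += 1
--     return num
-- ===== Notes on version B (the rewrite author's own statement) =====
-- stated objective: faster
-- what changed: B factorizes each grid cell once into its list of distinct prime factors (a precomputed table F) and replaces A's per-neighbor trial-division loop czynnikowo_podobne by a count of divisibility tests against F[w][k], keeping the neighbor-count==3 scan.
-- outside the precondition, e.g. on three([[]]): A returns 0, B raises IndexError
import Mathlib
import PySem

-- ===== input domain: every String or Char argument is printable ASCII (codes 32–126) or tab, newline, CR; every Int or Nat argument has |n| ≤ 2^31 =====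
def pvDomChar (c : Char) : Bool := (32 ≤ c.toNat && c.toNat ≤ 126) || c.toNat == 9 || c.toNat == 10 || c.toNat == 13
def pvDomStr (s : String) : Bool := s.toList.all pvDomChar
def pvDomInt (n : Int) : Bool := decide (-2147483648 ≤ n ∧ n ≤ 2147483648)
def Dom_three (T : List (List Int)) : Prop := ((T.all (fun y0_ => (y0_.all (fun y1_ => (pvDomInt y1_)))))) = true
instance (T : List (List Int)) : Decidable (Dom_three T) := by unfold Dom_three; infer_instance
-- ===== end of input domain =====

-- B factorizes each grid cell ONCE into its list of distinct prime factors and replaces the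
-- per-neighbor trial-division comparison by divisibility lookups into that table (objective: faster).

-- shared helper: T[w][k] (total form; Pre_three keeps every access in range)
def pvCell (T : List (List Int)) (w k : Int) : Int :=
  PySem.List.pyGetD (PySem.List.pyGetD T w []) k 0

def pvOffsets : List (Int × Int) :=
  [(-1,-1),(-1,0),(-1,1),(0,-1),(0,1),(1,-1),(1,0),(1,1)]

-- ===== PORT A =====
-- inner 'while p % d == 0: p //= d' (fuel ≥ p suffices: p at least halves each step)
def pvDivOutA : Nat → Int → Int → Int
  | 0, p, _ => p
  | f+1, p, d => if PySem.Int.mod p d == 0 then pvDivOutA f (PySem.Int.floordiv p d) d else p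

-- outer while loop of czynnikowo_podobne; fuel ≥ m suffices (d grows by 1 each pass, never past p)
def pvCzLoop (nn : Int) : Nat → Int → Int → Int → Bool
  | 0, _, _, w => w == 1
  | f+1, p, d, w =>
    if 1 < p then
      let w' := if PySem.Int.mod p d == 0 then
                  (if PySem.Int.mod nn d == 0 then w + 1 else w) else w
      let p' := if PySem.Int.mod p d == 0 then pvDivOutA p.toNat p d else p
      if 1 < w' then w' == 1
      else pvCzLoop nn f p' (d+1) w'
    else w == 1

def czynnikowo_podobne (m nn : Int) : Bool := pvCzLoop nn (m.toNat + 1) m 2 0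

def pvContains (w k n : Int) : Bool :=
  decide (0 ≤ w ∧ w < n) && decide (0 ≤ k ∧ k < n)

def three (T : List (List Int)) : Int :=
  let n : Int := (T.length : Int)
  (PySem.List.pyRange 0 n 1).foldl (fun num w =>
    (PySem.List.pyRange 0 n 1).foldl (fun num k =>
      let cp : Int := pvOffsets.foldl (fun cp xy =>
        if pvContains (w + xy.1) (k + xy.2) n &&
           czynnikowo_podobne (pvCell T w k) (pvCell T (w + xy.1) (k + xy.2))
        then cp + 1 else cp) 0
      if cp == 3 then num + 1 else num) num) 0

-- ===== PORT B =====
-- B's own inner 'while p % d == 0: p //= d'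
def pvDivOutB : Nat → Int → Int → Int
  | 0, p, _ => p
  | f+1, p, d => if PySem.Int.mod p d == 0 then pvDivOutB f (PySem.Int.floordiv p d) d else p

-- B's factorization while loop (fuel ≥ m suffices, as for A's loop)
def pvFactorsLoop : Nat → Int → Int → List Int
  | 0, _, _ => []
  | f+1, p, d =>
    if 1 < p then
      if PySem.Int.mod p d == 0 then d :: pvFactorsLoop f (pvDivOutB p.toNat p d) (d+1)
      else pvFactorsLoop f p (d+1)
    else []

def prime_factors (m : Int) : List Int := pvFactorsLoop (m.toNat + 1) m 2

def three_alt (T : List (List Int)) : Int :=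
  let n : Int := (T.length : Int)
  let F : List (List (List Int)) :=
    (PySem.List.pyRange 0 n 1).map (fun w =>
      (PySem.List.pyRange 0 n 1).map (fun k => prime_factors (pvCell T w k)))
  (PySem.List.pyRange 0 n 1).foldl (fun num w =>
    (PySem.List.pyRange 0 n 1).foldl (fun num k =>
      let cp : Int := pvOffsets.foldl (fun cp xy =>
        if (decide (0 ≤ w + xy.1 ∧ w + xy.1 < n) && decide (0 ≤ k + xy.2 ∧ k + xy.2 < n)) &&
           ((PySem.List.pyGetD (PySem.List.pyGetD F w []) k []).countP
              (fun q => PySem.Int.mod (pvCell T (w + xy.1) (k + xy.2)) q == 0) == 1)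
        then cp + 1 else cp) 0
      if cp == 3 then num + 1 else num) num) 0

-- ===== PRECONDITION & SPEC =====
-- Pre_ excludes ragged grids (a row shorter than len(T)): on these A raises IndexError, except in
-- grids with no in-range neighbor at all (e.g. [[]]), where A's lazy short-circuit never indexes and
-- returns 0 while B's eager factor table still indexes and raises IndexError.
def Pre_three (T : List (List Int)) : Prop := ∀ row ∈ T, T.length ≤ row.length
instance (T : List (List Int)) : Decidable (Pre_three T) := by unfold Pre_three; infer_instance
def pvWitness_three : List (List Int) := [[2, 3], [4, 5]]

def Spec_three (T : List (List Int)) (out : Int) : Prop := out = three_alt T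
instance (T : List (List Int)) (out : Int) : Decidable (Spec_three T out) := by unfold Spec_three; infer_instance

-- ===== CLAIM (what is proved, stated in full; the proofs are below) =====
def Claim_equal_three : Prop := ∀ (T : List (List Int)), Dom_three T → Pre_three T → Spec_three T (three T)

-- ===== LEMMAS AND PROOFS =====

-- the two verbatim inner division loops are the same function
lemma pvDivOut_eq (f : Nat) (p d : Int) : pvDivOutA f p d = pvDivOutB f p d := by
  induction f generalizing p with
  | zero => rfl
  | succ f ih => simp only [pvDivOutA, pvDivOutB, ih]

-- A's interleaved loop counts exactly the distinct prime factors of p (≥ d) that divide nn,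
-- as collected by B's factorization loop, and tests whether that count (plus w) is 1.
lemma pvCzLoop_eq_count (nn : Int) (f : Nat) (p d w : Int) :
    pvCzLoop nn f p d w
      = ((w + ((pvFactorsLoop f p d).countP (fun q => PySem.Int.mod nn q == 0) : Int)) == 1) := by
  induction f generalizing p d w with
  | zero => simp [pvCzLoop, pvFactorsLoop]
  | succ f ih =>
    simp only [pvCzLoop, pvFactorsLoop]
    by_cases hp : 1 < p
    · simp only [hp, if_true]
      by_cases hd : (PySem.Int.mod p d == 0) = true
      · by_cases hn : (PySem.Int.mod nn d == 0) = true
        · simp only [hd, hn, if_true, ih, pvDivOut_eq, List.countP_cons]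
          split_ifs with hw <;>
            first
            | rfl
            | (rw [Bool.eq_iff_iff]; simp only [beq_iff_eq]; omega)
        · simp only [hd, if_true, if_neg hn, ih, pvDivOut_eq, List.countP_cons]
          split_ifs with hw <;>
            first
            | rfl
            | (rw [Bool.eq_iff_iff]; simp only [beq_iff_eq]; omega)
      · simp only [if_neg hd, ih]
        split_ifs with hw <;>
          first
          | rfl
          | (rw [Bool.eq_iff_iff]; simp only [beq_iff_eq]; omega)
    · simp only [hp, if_false, List.countP_nil, Nat.cast_zero, add_zero]

lemma czynnikowo_eq_count (m nn : Int) :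
    czynnikowo_podobne m nn
      = ((prime_factors m).countP (fun q => PySem.Int.mod nn q == 0) == 1) := by
  simp only [czynnikowo_podobne, prime_factors, pvCzLoop_eq_count]
  rw [Bool.eq_iff_iff]; simp only [beq_iff_eq]; omega

lemma pvF_lookup (T : List (List Int)) (w k : Int)
    (hw0 : 0 ≤ w) (hw1 : w < (T.length : Int)) (hk0 : 0 ≤ k) (hk1 : k < (T.length : Int)) :
    PySem.List.pyGetD (PySem.List.pyGetD
        ((PySem.List.pyRange 0 (T.length : Int) 1).map (fun w =>
          (PySem.List.pyRange 0 (T.length : Int) 1).map (fun k => prime_factors (pvCell T w k)))) w []) k []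
      = prime_factors (pvCell T w k) := by
  rw [PySem.List.pyGetD_map_pyRange_of_nonneg _ _ _ _ hw0 hw1,
      PySem.List.pyGetD_map_pyRange_of_nonneg _ _ _ _ hk0 hk1]

theorem three_eq_alt (T : List (List Int)) : three T = three_alt T := by
  unfold three three_alt
  apply PySem.List.foldl_congr_mem
  intro num w hw
  rw [PySem.List.mem_pyRange_one] at hw
  apply PySem.List.foldl_congr_mem
  intro num' k hk
  rw [PySem.List.mem_pyRange_one] at hk
  have hcp :
      (pvOffsets.foldl (fun cp xy =>
        if pvContains (w + xy.1) (k + xy.2) (T.length : Int) &&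
           czynnikowo_podobne (pvCell T w k) (pvCell T (w + xy.1) (k + xy.2))
        then cp + 1 else cp) (0 : Int))
      = (pvOffsets.foldl (fun cp xy =>
        if (decide (0 ≤ w + xy.1 ∧ w + xy.1 < (T.length : Int)) &&
            decide (0 ≤ k + xy.2 ∧ k + xy.2 < (T.length : Int))) &&
           ((PySem.List.pyGetD (PySem.List.pyGetD
              ((PySem.List.pyRange 0 (T.length : Int) 1).map (fun w =>
                (PySem.List.pyRange 0 (T.length : Int) 1).map (fun k =>
                  prime_factors (pvCell T w k)))) w []) k []).countP
              (fun q => PySem.Int.mod (pvCell T (w + xy.1) (k + xy.2)) q == 0) == 1)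
        then cp + 1 else cp) (0 : Int)) := by
    apply PySem.List.foldl_congr_mem
    intro cp xy _
    rw [pvF_lookup T w k hw.1 hw.2 hk.1 hk.2, ← czynnikowo_eq_count]
    simp [pvContains]
  simp only [hcp]

-- ===== VERDICT (by name: the statement is the Claim_ definition above) =====
theorem three_spec : Claim_equal_three := by
  intro T _ _
  unfold Spec_three
  exact three_eq_alt T
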